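-- pv_equiv track=rewrite | github.com/prathmachowksey/Multivariate-Polynomial-Regression | generate_polynomials.py | get_powers
-- ===== SOURCE A (Python) =====
-- from itertools import combinations_with_replacement
--
-- def get_powers(degree):
--     l=[0,1]
--     powers=[]
--     for i in range(1,degree+1):
--         powers.append([x for x in combinations_with_replacement(l,i)])
--     powers_flattened=[]
--     for sublist in powers:
--         for x in sublist:
--             powers_flattened.append(x)
--     return powers_flattened
-- ===== SOURCE B (Python) =====
-- def get_powers(degree):
--     powers = []
--     for i in range(1, degree + 1):
--         for k in range(i + 1):
--             powers.append((0,) * (i - k) + (1,) * k)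
--     return powers
-- ===== Notes on version B (the rewrite author's own statement) =====
-- stated objective: simpler
-- what changed: Replaces the itertools combinations_with_replacement enumeration plus a separate flatten pass with direct closed-form construction of each tuple as (i-k) zeros followed by k ones in one nested counting loop.
import Mathlib
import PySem

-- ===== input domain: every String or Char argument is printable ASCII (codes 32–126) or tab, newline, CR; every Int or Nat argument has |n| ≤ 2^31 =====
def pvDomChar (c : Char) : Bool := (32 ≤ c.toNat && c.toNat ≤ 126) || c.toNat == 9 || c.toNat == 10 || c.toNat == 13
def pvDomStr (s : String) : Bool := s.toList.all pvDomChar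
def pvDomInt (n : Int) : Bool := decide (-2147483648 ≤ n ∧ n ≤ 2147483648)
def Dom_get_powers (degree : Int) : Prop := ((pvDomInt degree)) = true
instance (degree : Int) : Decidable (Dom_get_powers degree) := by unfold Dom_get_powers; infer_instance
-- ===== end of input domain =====

-- B replaces the itertools combinations_with_replacement enumeration plus a flatten pass
-- with direct closed-form construction of each tuple as (i-k) zeros then k ones (simpler).

-- ===== PORT A =====
-- itertools.combinations_with_replacement(pool, r): pool[j] :: t for each start index j
-- and each t in cwr of the suffix pool[j:] with length r-1 (exact for this use).
def pvCwr (pool : List Int) : Nat → List (List Int)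
  | 0 => [[]]
  | r + 1 =>
    (List.range pool.length).flatMap (fun j =>
      (pvCwr (pool.drop j) r).map (fun t => (pool.drop j).headD 0 :: t))

def get_powers (degree : Int) : List (List Int) :=
  let powers : List (List (List Int)) :=
    (PySem.List.pyRange 1 (degree + 1) 1).foldl
      (fun acc i => acc ++ [pvCwr [0, 1] i.toNat]) []
  powers.foldl (fun acc sublist => sublist.foldl (fun acc2 x => acc2 ++ [x]) acc) []

-- ===== PORT B =====
def get_powers_alt (degree : Int) : List (List Int) :=
  (PySem.List.pyRange 1 (degree + 1) 1).foldl (fun acc i =>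
    (PySem.List.pyRange 0 (i + 1) 1).foldl (fun acc2 k =>
      acc2 ++ [List.replicate (i - k).toNat 0 ++ List.replicate k.toNat 1]) acc) []

-- ===== PRECONDITION & SPEC =====
def Spec_get_powers (degree : Int) (out : List (List Int)) : Prop := out = get_powers_alt degree
instance (degree : Int) (out : List (List Int)) : Decidable (Spec_get_powers degree out) := by unfold Spec_get_powers; infer_instance

-- ===== CLAIM (what is proved, stated in full; the proofs are below) =====
def Claim_equal_get_powers : Prop := ∀ (degree : Int), Dom_get_powers degree → Spec_get_powers degree (get_powers degree)

-- ===== LEMMAS AND PROOFS =====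

-- canonical form of the rows of degree n
def pvRow (n k : Nat) : List Int := List.replicate (n - k) 0 ++ List.replicate k 1

lemma pvCwr_one (n : Nat) : pvCwr [1] n = [List.replicate n 1] := by
  induction n with
  | zero => rfl
  | succ n ih => simp [pvCwr, ih, List.range_succ, List.replicate_succ]

lemma pvCwr_01 (n : Nat) :
    pvCwr [0, 1] n = (List.range (n + 1)).map (pvRow n) := by
  induction n with
  | zero => rfl
  | succ n ih =>
    have step : pvCwr [0, 1] (n + 1)
        = (pvCwr [0, 1] n).map (fun t => (0 : Int) :: t) ++ [List.replicate (n + 1) 1] := by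
      simp [pvCwr, List.range_succ, pvCwr_one, List.replicate_succ]
    rw [step, ih, List.map_map]
    rw [show List.range (n + 1 + 1) = List.range (n + 1) ++ [n + 1] from List.range_succ]
    rw [List.map_append]
    congr 1
    · apply List.map_congr_left
      intro k hk
      have hk' : k ≤ n := by simpa [Nat.lt_succ_iff] using List.mem_range.mp hk
      simp only [Function.comp_apply, pvRow]
      have : n + 1 - k = (n - k) + 1 := by omega
      simp [this, List.replicate_succ]
    · simp [pvRow]

-- inner singleton-append folds are map/append (A's flatten, B's inner loop)
lemma fold_snoc {α : Type} (xs : List α) (acc : List α) :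
    xs.foldl (fun a x => a ++ [x]) acc = acc ++ xs :=
  PySem.List.foldl_append_singleton xs acc

lemma flatten_fold (ls : List (List (List Int))) (acc : List (List Int)) :
    ls.foldl (fun a sub => sub.foldl (fun a2 x => a2 ++ [x]) a) acc = acc ++ ls.flatten := by
  induction ls generalizing acc with
  | nil => simp
  | cons s ls ih =>
    simp only [List.foldl_cons]
    rw [fold_snoc, ih]
    simp

-- A's value: flatMap of pvCwr over the outer range
lemma get_powers_eq_flatMap (degree : Int) :
    get_powers degree
      = (PySem.List.pyRange 1 (degree + 1) 1).flatMap (fun i => pvCwr [0, 1] i.toNat) := by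
  show (((PySem.List.pyRange 1 (degree + 1) 1).foldl
      (fun acc i => acc ++ [pvCwr [0, 1] i.toNat]) []).foldl
        (fun acc sublist => sublist.foldl (fun acc2 x => acc2 ++ [x]) acc) []) = _
  rw [PySem.List.foldl_append_singleton_eq_map, flatten_fold, List.flatMap_def]
  simp

-- B's inner loop over range(0, i+1) produces exactly the canonical rows of degree i
lemma alt_inner (i : Int) (hi : 0 ≤ i) (acc : List (List Int)) :
    (PySem.List.pyRange 0 (i + 1) 1).foldl (fun acc2 k =>
        acc2 ++ [List.replicate (i - k).toNat 0 ++ List.replicate k.toNat 1]) acc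
      = acc ++ (List.range (i.toNat + 1)).map (pvRow i.toNat) := by
  rw [PySem.List.foldl_append_singleton_eq_map]
  congr 1
  rw [PySem.List.pyRange_one 0 (i + 1)]
  have : (i + 1 - 0).toNat = i.toNat + 1 := by omega
  rw [this, List.map_map]
  apply List.map_congr_left
  intro k hk
  have hk' : k ≤ i.toNat := by simpa [Nat.lt_succ_iff] using List.mem_range.mp hk
  simp only [Function.comp_apply, pvRow]
  have h1 : (i - (0 + (k : Int))).toNat = i.toNat - k := by omega
  have h2 : ((0 : Int) + (k : Int)).toNat = k := by omega
  rw [h1, h2]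

lemma get_powers_alt_eq_flatMap (degree : Int) :
    get_powers_alt degree
      = (PySem.List.pyRange 1 (degree + 1) 1).flatMap
          (fun i => (List.range (i.toNat + 1)).map (pvRow i.toNat)) := by
  unfold get_powers_alt
  have h : (PySem.List.pyRange 1 (degree + 1) 1).foldl
      (fun acc i => (PySem.List.pyRange 0 (i + 1) 1).foldl
        (fun acc2 k => acc2 ++ [List.replicate (i - k).toNat 0 ++ List.replicate k.toNat 1]) acc) []
    = (PySem.List.pyRange 1 (degree + 1) 1).foldl
      (fun acc i => acc ++ (List.range (i.toNat + 1)).map (pvRow i.toNat)) [] := by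
    apply PySem.List.foldl_congr_mem
    intro acc i hi
    have h1 : (1 : Int) ≤ i := (PySem.List.mem_pyRange_one.mp hi).1
    exact alt_inner i (by omega) acc
  rw [h, PySem.List.foldl_append_eq_flatMap]
  simp

-- ===== VERDICT (by name: the statement is the Claim_ definition above) =====
theorem get_powers_spec : Claim_equal_get_powers := by
  intro degree _
  unfold Spec_get_powers
  rw [get_powers_eq_flatMap, get_powers_alt_eq_flatMap]
  congr 1
  funext i
  exact pvCwr_01 i.toNat
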